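-- pv_equiv track=rewrite | github.com/LittlePyx/Pi_zaya | kb/converter/quality_compare.py | _count_table_blocks
-- ===== SOURCE A (Python) =====
-- def _count_table_blocks(md_text: str) -> int:
--     count = 0
--     run = 0
--     for raw in md_text.splitlines():
--         stripped = (raw or "").strip()
--         is_table_row = stripped.startswith("|") and stripped.count("|") >= 2 and (not stripped.startswith("```"))
--         if is_table_row:
--             run += 1
--             continue
--         if run >= 2:
--             count += 1
--         run = 0
--     if run >= 2:
--         count += 1
--     return count
-- ===== SOURCE B (Python) =====
-- def _count_table_blocks(md_text: str) -> int:
--     def is_row(raw: str) -> bool: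
--         stripped = (raw or "").strip()
--         return stripped.startswith("|") and stripped.count("|") >= 2 and (not stripped.startswith("```"))
--
--     flags = [is_row(line) for line in md_text.splitlines()]
--     count = 0
--     i = 0
--     n = len(flags)
--     while i < n:
--         j = i
--         while j < n and flags[j] == flags[i]:
--             j += 1
--         if flags[i] and j - i >= 2:
--             count += 1
--         i = j
--     return count
-- ===== Notes on version B (the rewrite author's own statement) =====
-- stated objective: alternative
-- what changed: B first maps every line to a boolean table-row flag, then counts maximal runs of equal flags in a second group-and-filter pass (run of True with length >= 2), replacing A's single stateful loop with run counter and post-loop flush.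
import Mathlib
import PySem

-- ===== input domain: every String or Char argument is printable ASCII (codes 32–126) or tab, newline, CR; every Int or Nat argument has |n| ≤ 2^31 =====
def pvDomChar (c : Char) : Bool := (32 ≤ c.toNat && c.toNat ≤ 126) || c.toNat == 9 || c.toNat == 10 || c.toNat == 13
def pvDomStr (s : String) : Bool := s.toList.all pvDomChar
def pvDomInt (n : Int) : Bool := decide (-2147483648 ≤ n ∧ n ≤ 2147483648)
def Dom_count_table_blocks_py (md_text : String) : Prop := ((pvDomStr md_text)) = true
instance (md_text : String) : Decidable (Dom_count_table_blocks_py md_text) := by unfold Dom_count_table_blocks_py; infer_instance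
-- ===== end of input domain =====

-- B replaces A's single stateful loop (run counter + post-loop flush) by a two-phase
-- group-and-filter pass over a precomputed list of boolean row flags (objective: alternative).

-- ===== PORT A =====
-- single fold carrying (count, run); flush after the loop — literal transliteration of A
def count_table_blocks_py (md_text : String) : Int :=
  let st := (PySem.Str.splitlines md_text).foldl
    (fun (st : Int × Int) raw =>
      let stripped := PySem.Str.strip raw   -- (raw or "") ≡ raw for strings
      let is_table_row := PySem.Str.startswith stripped "|"
        && decide (2 ≤ PySem.Str.count stripped "|")
        && !(PySem.Str.startswith stripped "```")
      if is_table_row then (st.1, st.2 + 1)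
      else (if 2 ≤ st.2 then st.1 + 1 else st.1, 0))
    (0, 0)
  if 2 ≤ st.2 then st.1 + 1 else st.1

-- ===== PORT B =====
def pvIsRowB (raw : String) : Bool :=
  let stripped := PySem.Str.strip raw
  PySem.Str.startswith stripped "|"
    && decide (2 ≤ PySem.Str.count stripped "|")
    && !(PySem.Str.startswith stripped "```")

-- the inner while of Source B scans the maximal run of equal flags (takeWhile/dropWhile)
def pvGroupCount : List Bool → Int
  | [] => 0
  | b :: rest =>
    let grpLen := 1 + (rest.takeWhile (· == b)).length
    (if b && decide (2 ≤ grpLen) then 1 else 0) + pvGroupCount (rest.dropWhile (· == b))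
termination_by fl => fl.length
decreasing_by
  simp only [List.length_cons]
  exact Nat.lt_succ_of_le (List.length_dropWhile_le _ _)

def count_table_blocks_py_alt (md_text : String) : Int :=
  pvGroupCount ((PySem.Str.splitlines md_text).map pvIsRowB)

-- ===== PRECONDITION & SPEC =====
def Spec_count_table_blocks_py (md_text : String) (out : Int) : Prop := out = count_table_blocks_py_alt md_text
instance (md_text : String) (out : Int) : Decidable (Spec_count_table_blocks_py md_text out) := by unfold Spec_count_table_blocks_py; infer_instance

-- ===== CLAIM (what is proved, stated in full; the proofs are below) =====
def Claim_equal_count_table_blocks_py : Prop := ∀ (md_text : String), Dom_count_table_blocks_py md_text → Spec_count_table_blocks_py md_text (count_table_blocks_py md_text)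

-- ===== LEMMAS AND PROOFS =====

-- proof-side names for A's loop body and final flush (definitionally equal to port A's inline code)
def pvStepA (st : Int × Int) (raw : String) : Int × Int :=
  if pvIsRowB raw then (st.1, st.2 + 1) else (if 2 ≤ st.2 then st.1 + 1 else st.1, 0)

def pvFin (st : Int × Int) : Int := if 2 ≤ st.2 then st.1 + 1 else st.1

-- proof-side helper: A's loop read off the flag list, with pending run r
def pvH (r : Int) : List Bool → Int
  | [] => if 2 ≤ r then 1 else 0
  | b :: t => if b then pvH (r + 1) t else (if 2 ≤ r then 1 else 0) + pvH 0 t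

theorem pvA_eq_pvH (lines : List String) : ∀ (c r : Int),
    pvFin (lines.foldl pvStepA (c, r)) = c + pvH r (lines.map pvIsRowB) := by
  induction lines with
  | nil =>
    intro c r
    simp only [List.foldl_nil, List.map_nil, pvFin, pvH]
    split <;> omega
  | cons raw t ih =>
    intro c r
    rw [List.foldl_cons, List.map_cons]
    have hs : pvStepA (c, r) raw
        = if pvIsRowB raw then (c, r + 1) else (if 2 ≤ r then c + 1 else c, 0) := rfl
    rw [hs]
    by_cases hb : pvIsRowB raw = true
    · rw [if_pos hb, ih]
      simp only [pvH, hb, if_true]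
    · have hb' : pvIsRowB raw = false := Bool.not_eq_true _ |>.mp hb
      rw [if_neg hb, ih]
      simp only [pvH, hb', Bool.false_eq_true, if_false]
      split <;> omega

theorem pvGroupCount_false_cons (t : List Bool) :
    pvGroupCount (false :: t) = pvGroupCount t := by
  cases t with
  | nil => simp [pvGroupCount]
  | cons b t2 =>
    cases b with
    | false => simp [pvGroupCount]
    | true => simp [pvGroupCount]

-- combined invariant, by strong induction on the length
theorem pvH_eq_groupCount_aux : ∀ (n : Nat) (t : List Bool), t.length ≤ n →
    (pvH 0 t = pvGroupCount t) ∧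
    (∀ r : Int, 0 ≤ r → pvH (r + 1) t =
      (if 2 ≤ r + 1 + ((t.takeWhile (· == true)).length : Int) then 1 else 0)
        + pvGroupCount (t.dropWhile (· == true))) := by
  intro n
  induction n with
  | zero =>
    intro t ht
    have he : t = [] := List.length_eq_zero_iff.mp (Nat.le_zero.mp ht)
    subst he
    constructor
    · simp [pvH, pvGroupCount]
    · intro r hr
      simp only [pvH, pvGroupCount, List.takeWhile_nil, List.dropWhile_nil,
        List.length_nil, Int.natCast_zero, add_zero]
  | succ n ih =>
    intro t ht
    cases t with
    | nil =>
      constructor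
      · simp [pvH, pvGroupCount]
      · intro r hr
        simp only [pvH, pvGroupCount, List.takeWhile_nil, List.dropWhile_nil,
          List.length_nil, Int.natCast_zero, add_zero]
    | cons b t2 =>
      have ht2 : t2.length ≤ n := by
        simp only [List.length_cons] at ht; omega
      obtain ⟨ih1, ih2⟩ := ih t2 ht2
      cases b with
      | false =>
        constructor
        · have h0 : pvH 0 (false :: t2) = pvH 0 t2 := by simp [pvH]
          rw [h0, ih1, pvGroupCount_false_cons]
        · intro r hr
          have h0 : pvH (r + 1) (false :: t2) = (if 2 ≤ r + 1 then 1 else 0) + pvH 0 t2 := by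
            simp [pvH]
          rw [h0, ih1]
          have htw : (false :: t2).takeWhile (· == true) = [] := by simp
          have hdw : (false :: t2).dropWhile (· == true) = false :: t2 := by simp
          rw [htw, hdw, pvGroupCount_false_cons]
          simp only [List.length_nil, Int.natCast_zero, add_zero]
      | true =>
        have htw : (true :: t2).takeWhile (· == true) = true :: t2.takeWhile (· == true) := by
          simp
        have hdw : (true :: t2).dropWhile (· == true) = t2.dropWhile (· == true) := by
          simp
        have hg : pvGroupCount (true :: t2)
            = (if true && decide (2 ≤ 1 + (t2.takeWhile (· == true)).length) then 1 else 0)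
              + pvGroupCount (t2.dropWhile (· == true)) := by
          simp only [pvGroupCount]
        constructor
        · have h0 : pvH 0 (true :: t2) = pvH 1 t2 := by simp [pvH]
          have h1 := ih2 0 le_rfl
          simp only [zero_add] at h1
          rw [h0, h1, hg]
          congr 1
          by_cases h2 : 2 ≤ 1 + (t2.takeWhile (· == true)).length
          · rw [if_pos (by exact_mod_cast h2),
              if_pos (by rw [Bool.true_and]; simp only [decide_eq_true_eq]; exact h2)]
          · rw [if_neg (by exact_mod_cast h2),
              if_neg (by rw [Bool.true_and]; simp only [decide_eq_true_eq]; exact h2)]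
        · intro r hr
          have h0 : pvH (r + 1) (true :: t2) = pvH (r + 1 + 1) t2 := by simp [pvH]
          rw [h0, ih2 (r + 1) (by omega), htw, hdw]
          congr 1
          simp only [List.length_cons]
          by_cases hA : 2 ≤ r + 1 + 1 + ((t2.takeWhile (· == true)).length : Int)
          · rw [if_pos hA, if_pos (by push_cast; omega)]
          · rw [if_neg hA, if_neg (by push_cast; omega)]

theorem pvH_eq_groupCount (t : List Bool) : pvH 0 t = pvGroupCount t :=
  (pvH_eq_groupCount_aux t.length t le_rfl).1

-- ===== VERDICT (by name: the statement is the Claim_ definition above) =====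
theorem count_table_blocks_py_spec : Claim_equal_count_table_blocks_py := by
  intro md_text _
  show count_table_blocks_py md_text = count_table_blocks_py_alt md_text
  have hA : count_table_blocks_py md_text
      = pvFin ((PySem.Str.splitlines md_text).foldl pvStepA (0, 0)) := rfl
  rw [hA, pvA_eq_pvH (PySem.Str.splitlines md_text) 0 0, pvH_eq_groupCount]
  simp [count_table_blocks_py_alt]
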